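-- pv_equiv track=rewrite | github.com/danieldelucca/legendaptturbo | funções/funções_de_transformações.py | remover_linhas_vazias
-- ===== SOURCE A (Python) =====
-- def remover_linhas_vazias(linhas_pt):
--     set_remover_linhas = set()  # Set para armazenar linhas a serem removidas.
--
--     # Remover blocos de legenda cujo texto foi excluído por alguma das funções.
--     for i, linha in enumerate(linhas_pt):
--
--         if i + 3 < len(linhas_pt):
--             # Tomar como referência o índice da linha de temporização.
--             if '-->' in linhas_pt[i]:
--                 texto_bloco_strip = linhas_pt[i + 1].strip()
--                 texto_bloco_está_vazio = texto_bloco_strip == ''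
--
--                 # Se linhas 1/2, 2/2 e 3/2 estiverem vazias, remover todo o bloco.
--                 if texto_bloco_está_vazio:
--                     for i in range(i - 1, i + 2):
--                         set_remover_linhas.add(i)
--
--     # Redefinir linhas, excluindo as linhas que constam em 'set_remover_linhas'.
--     linhas_pt = [linha for i, linha in enumerate(linhas_pt)
--                  if i not in set_remover_linhas]
--
--     return linhas_pt
-- ===== SOURCE B (Python) =====
-- def remover_linhas_vazias(linhas_pt):
--     n = len(linhas_pt)
--
--     def bloco_vazio(i):
--         # índice i é uma linha de temporização de um bloco cujo texto está vazio
--         return (0 <= i and i + 3 < n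
--                 and '-->' in linhas_pt[i]
--                 and linhas_pt[i + 1].strip() == '')
--
--     # uma linha j pertence a um bloco removido sse está a distância <= 1 de
--     # uma linha de temporização vazia: passada única, sem conjunto auxiliar
--     return [linha for j, linha in enumerate(linhas_pt)
--             if not (bloco_vazio(j - 1) or bloco_vazio(j) or bloco_vazio(j + 1))]
-- ===== Notes on version B (the rewrite author's own statement) =====
-- stated objective: simpler
-- what changed: Replaces the two-phase 'collect removal indices into a set, then filter by membership' with a single comprehension that keeps line j iff no adjacent index (j-1, j, j+1) is an empty-block timing line, tested locally with no auxiliary set.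
import Mathlib
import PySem

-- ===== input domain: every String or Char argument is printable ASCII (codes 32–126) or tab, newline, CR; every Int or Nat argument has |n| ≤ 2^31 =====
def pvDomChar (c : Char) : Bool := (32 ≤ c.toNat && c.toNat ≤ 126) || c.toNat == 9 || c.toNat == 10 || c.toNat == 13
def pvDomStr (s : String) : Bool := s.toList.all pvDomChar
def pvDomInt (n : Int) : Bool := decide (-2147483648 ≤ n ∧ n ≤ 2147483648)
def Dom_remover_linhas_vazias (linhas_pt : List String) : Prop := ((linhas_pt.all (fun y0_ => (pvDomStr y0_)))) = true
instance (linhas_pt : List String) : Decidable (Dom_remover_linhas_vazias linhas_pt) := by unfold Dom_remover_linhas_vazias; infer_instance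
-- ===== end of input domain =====

-- B: one-pass comprehension testing each line's neighbourhood locally, instead of A's
-- two-phase "collect removal indices into a set, then filter" — simpler, no auxiliary set.


-- ===== PORT A =====
def remover_linhas_vazias (linhas_pt : List String) : List String :=
  let set_remover_linhas :=
    (PySem.List.enumerate linhas_pt).foldl
      (fun s p =>
        if p.1 + 3 < (linhas_pt.length : Int) then
          if PySem.Str.isIn "-->" (PySem.List.pyGetD linhas_pt p.1 "") then
            if PySem.Str.strip (PySem.List.pyGetD linhas_pt (p.1 + 1) "") == "" then
              (PySem.List.pyRange (p.1 - 1) (p.1 + 2) 1).foldl PySem.Set.add s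
            else s
          else s
        else s)
      (PySem.Set.empty : PySem.Set Int)
  ((PySem.List.enumerate linhas_pt).filter
      (fun p => !(PySem.Set.contains set_remover_linhas p.1))).map (·.2)

-- ===== PORT B =====
-- helper of B: index i is the timing line of a subtitle block whose text is empty
def pvBlocoVazio (linhas_pt : List String) (i : Int) : Bool :=
  decide (0 ≤ i) && decide (i + 3 < (linhas_pt.length : Int)) &&
    PySem.Str.isIn "-->" (PySem.List.pyGetD linhas_pt i "") &&
    (PySem.Str.strip (PySem.List.pyGetD linhas_pt (i + 1) "") == "")

def remover_linhas_vazias_alt (linhas_pt : List String) : List String :=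
  ((PySem.List.enumerate linhas_pt).filter
      (fun p => !(pvBlocoVazio linhas_pt (p.1 - 1) || pvBlocoVazio linhas_pt p.1 ||
                  pvBlocoVazio linhas_pt (p.1 + 1)))).map (·.2)

-- ===== PRECONDITION & SPEC =====
def Spec_remover_linhas_vazias (linhas_pt : List String) (out : List String) : Prop := out = remover_linhas_vazias_alt linhas_pt
instance (linhas_pt : List String) (out : List String) : Decidable (Spec_remover_linhas_vazias linhas_pt out) := by unfold Spec_remover_linhas_vazias; infer_instance

-- ===== CLAIM (what is proved, stated in full; the proofs are below) =====
def Claim_equal_remover_linhas_vazias : Prop := ∀ (linhas_pt : List String), Dom_remover_linhas_vazias linhas_pt → Spec_remover_linhas_vazias linhas_pt (remover_linhas_vazias linhas_pt)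

-- ===== LEMMAS AND PROOFS =====

-- range(i-1, i+2) is the three-element neighbourhood of i
theorem pvNbhd (i : Int) : PySem.List.pyRange (i - 1) (i + 2) 1 = [i - 1, i, i + 1] := by
  rw [PySem.List.pyRange_one_cons (by omega), PySem.List.pyRange_one_cons (by omega),
      PySem.List.pyRange_one_cons (by omega), PySem.List.pyRange_one_eq_nil (by omega)]
  norm_num

-- membership after A's collection loop, for an abstract per-pair condition c
theorem pvMemFold (c : Int × String → Bool) (l : List (Int × String)) (s : PySem.Set Int) (x : Int) :
    x ∈ l.foldl (fun s p => if c p then ([p.1 - 1, p.1, p.1 + 1].foldl PySem.Set.add s) else s) s ↔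
      x ∈ s ∨ ∃ p ∈ l, c p = true ∧ (x = p.1 - 1 ∨ x = p.1 ∨ x = p.1 + 1) := by
  induction l generalizing s with
  | nil => simp
  | cons q l ih =>
    simp only [List.mem_cons]
    rw [List.foldl_cons, ih]
    by_cases hc : c q
    · rw [if_pos hc]
      simp only [List.foldl_cons, List.foldl_nil, PySem.Set.mem_add]
      constructor
      · rintro ((((h | h) | h) | h) | ⟨p, hp, hcp, hx⟩)
        · exact Or.inl h
        · exact Or.inr ⟨q, Or.inl rfl, hc, Or.inl h⟩
        · exact Or.inr ⟨q, Or.inl rfl, hc, Or.inr (Or.inl h)⟩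
        · exact Or.inr ⟨q, Or.inl rfl, hc, Or.inr (Or.inr h)⟩
        · exact Or.inr ⟨p, Or.inr hp, hcp, hx⟩
      · rintro (h | ⟨p, rfl | hp, hcp, hx⟩)
        · exact Or.inl (Or.inl (Or.inl (Or.inl h)))
        · rcases hx with h | h | h
          · exact Or.inl (Or.inl (Or.inl (Or.inr h)))
          · exact Or.inl (Or.inl (Or.inr h))
          · exact Or.inl (Or.inr h)
        · exact Or.inr ⟨p, hp, hcp, hx⟩
    · rw [if_neg hc]
      constructor
      · rintro (h | ⟨p, hp, hcp, hx⟩)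
        · exact Or.inl h
        · exact Or.inr ⟨p, Or.inr hp, hcp, hx⟩
      · rintro (h | ⟨p, rfl | hp, hcp, hx⟩)
        · exact Or.inl h
        · exact absurd hcp hc
        · exact Or.inr ⟨p, hp, hcp, hx⟩

-- an enumerate entry's index lies in [s, s + len)
theorem pvEnumBounds {α : Type} (xs : List α) (s k : Int) (a : α)
    (h : (k, a) ∈ PySem.List.enumerate xs s) : s ≤ k ∧ k < s + xs.length := by
  induction xs generalizing s with
  | nil => simp [PySem.List.enumerate_nil] at h
  | cons x xs ih =>
    rw [PySem.List.enumerate_cons] at h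
    rcases List.mem_cons.1 h with h | h
    · cases h
      exact ⟨le_refl _, by simp only [List.length_cons]; push_cast; omega⟩
    · have := ih (s + 1) h
      simp only [List.length_cons] at this ⊢
      push_cast at this ⊢
      omega

-- every index in [s, s + len) occurs in enumerate
theorem pvEnumExists {α : Type} (xs : List α) (s i : Int)
    (h1 : s ≤ i) (h2 : i < s + xs.length) : ∃ a, (i, a) ∈ PySem.List.enumerate xs s := by
  induction xs generalizing s with
  | nil => simp at h2; omega
  | cons x xs ih =>
    rw [PySem.List.enumerate_cons]
    by_cases hi : i = s
    · exact ⟨x, by simp [hi]⟩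
    · have h2' : i < (s + 1) + (xs.length : Int) := by
        simp only [List.length_cons] at h2; push_cast at h2 ⊢; omega
      obtain ⟨a, ha⟩ := ih (s + 1) (by omega) h2'
      exact ⟨a, List.mem_cons_of_mem _ ha⟩

theorem remover_linhas_vazias_eq (linhas_pt : List String) :
    remover_linhas_vazias linhas_pt = remover_linhas_vazias_alt linhas_pt := by
  unfold remover_linhas_vazias remover_linhas_vazias_alt
  dsimp only []
  congr 1
  apply List.filter_congr
  rintro ⟨i, a⟩ hmem
  have hbounds := pvEnumBounds linhas_pt 0 i a hmem
  -- rewrite A's step to the abstract-condition shape of pvMemFold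
  have hstep :
      (fun (s : PySem.Set Int) (p : Int × String) =>
        if p.1 + 3 < (linhas_pt.length : Int) then
          if PySem.Str.isIn "-->" (PySem.List.pyGetD linhas_pt p.1 "") then
            if PySem.Str.strip (PySem.List.pyGetD linhas_pt (p.1 + 1) "") == "" then
              (PySem.List.pyRange (p.1 - 1) (p.1 + 2) 1).foldl PySem.Set.add s
            else s
          else s
        else s) =
      (fun (s : PySem.Set Int) (p : Int × String) =>
        if (decide (p.1 + 3 < (linhas_pt.length : Int)) &&
            PySem.Str.isIn "-->" (PySem.List.pyGetD linhas_pt p.1 "") &&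
            (PySem.Str.strip (PySem.List.pyGetD linhas_pt (p.1 + 1) "") == "")) then
          ([p.1 - 1, p.1, p.1 + 1].foldl PySem.Set.add s)
        else s) := by
    funext s p
    by_cases h1 : p.1 + 3 < (linhas_pt.length : Int)
    · by_cases h2 : PySem.Str.isIn "-->" (PySem.List.pyGetD linhas_pt p.1 "") = true
      · by_cases h3 : (PySem.Str.strip (PySem.List.pyGetD linhas_pt (p.1 + 1) "") == "") = true
        · rw [if_pos h1, if_pos h2, if_pos h3, pvNbhd,
              if_pos (by simp only [Bool.and_eq_true, decide_eq_true_eq]; exact ⟨⟨h1, h2⟩, h3⟩)]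
        · rw [if_pos h1, if_pos h2, if_neg h3,
              if_neg (by simp only [Bool.and_eq_true, decide_eq_true_eq]; exact fun h => h3 h.2)]
      · rw [if_pos h1, if_neg h2,
            if_neg (by simp only [Bool.and_eq_true, decide_eq_true_eq]; exact fun h => h2 h.1.2)]
    · rw [if_neg h1,
          if_neg (by simp only [Bool.and_eq_true, decide_eq_true_eq]; exact fun h => h1 h.1.1)]
  rw [hstep]
  rw [show ((!(PySem.Set.contains _ i)) = _) ↔ _ from Bool.not_inj_iff, Bool.eq_iff_iff,
      PySem.Set.contains_iff, pvMemFold]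
  have hbl : ∀ k : Int, pvBlocoVazio linhas_pt k = true ↔
      (0 ≤ k ∧ k + 3 < (linhas_pt.length : Int) ∧
        PySem.Str.isIn "-->" (PySem.List.pyGetD linhas_pt k "") = true ∧
        (PySem.Str.strip (PySem.List.pyGetD linhas_pt (k + 1) "") == "") = true) := by
    intro k
    simp [pvBlocoVazio, and_assoc]
  simp only [PySem.Set.empty, List.not_mem_nil, false_or, Bool.or_eq_true]
  rw [hbl, hbl, hbl]
  constructor
  · rintro ⟨⟨j, b⟩, hp, hc, hx⟩
    have hb := pvEnumBounds linhas_pt 0 j b hp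
    simp only [Bool.and_eq_true, decide_eq_true_eq] at hc
    obtain ⟨⟨hc1, hc2⟩, hc3⟩ := hc
    rcases hx with rfl | rfl | rfl
    · refine Or.inr ?_
      have e : j - 1 + 1 = j := by omega
      rw [e]
      exact ⟨by omega, hc1, hc2, hc3⟩
    · exact Or.inl (Or.inr ⟨by omega, hc1, hc2, hc3⟩)
    · refine Or.inl (Or.inl ?_)
      have e : j + 1 - 1 = j := by omega
      rw [e]
      exact ⟨by omega, hc1, hc2, hc3⟩
  · rintro ((⟨h0, h3, hin, hst⟩ | ⟨h0, h3, hin, hst⟩) | ⟨h0, h3, hin, hst⟩)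
    · obtain ⟨b, hb⟩ := pvEnumExists linhas_pt 0 (i - 1) (by omega) (by omega)
      refine ⟨⟨i - 1, b⟩, hb, ?_, Or.inr (Or.inr (by omega))⟩
      simp only [Bool.and_eq_true, decide_eq_true_eq]
      exact ⟨⟨h3, hin⟩, hst⟩
    · obtain ⟨b, hb⟩ := pvEnumExists linhas_pt 0 i (by omega) (by omega)
      refine ⟨⟨i, b⟩, hb, ?_, Or.inr (Or.inl rfl)⟩
      simp only [Bool.and_eq_true, decide_eq_true_eq]
      exact ⟨⟨h3, hin⟩, hst⟩
    · obtain ⟨b, hb⟩ := pvEnumExists linhas_pt 0 (i + 1) (by omega) (by omega)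
      refine ⟨⟨i + 1, b⟩, hb, ?_, Or.inl (by omega)⟩
      simp only [Bool.and_eq_true, decide_eq_true_eq]
      exact ⟨⟨h3, hin⟩, hst⟩

-- ===== VERDICT (by name: the statement is the Claim_ definition above) =====
theorem remover_linhas_vazias_spec : Claim_equal_remover_linhas_vazias := by
  intro linhas_pt _
  unfold Spec_remover_linhas_vazias
  exact remover_linhas_vazias_eq linhas_pt
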